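-- pv_equiv track=rewrite | github.com/MrBrantCode/unitest_baseline | mut_generate/mist_train_cf/cf_75367/solution.py | shared_elements
-- ===== SOURCE A (Python) =====
-- def shared_elements(arr1, arr2):
--     frequency_dict = {}
--     for item in arr1:
--         if item in arr2:
--             if item in frequency_dict:
--                 frequency_dict[item]['arr1'] += 1
--             else:
--                 frequency_dict[item] = {'arr1': 1, 'arr2': 0}
--
--     for item in arr2:
--         if item in arr1:
--             if item in frequency_dict:
--                 frequency_dict[item]['arr2'] += 1
--             else:
--                 frequency_dict[item] = {'arr1': 0, 'arr2': 1}
--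
--     return frequency_dict
-- ===== SOURCE B (Python) =====
-- def shared_elements(arr1, arr2):
--     c1 = {}
--     for x in arr1:
--         c1[x] = c1.get(x, 0) + 1
--     c2 = {}
--     for x in arr2:
--         c2[x] = c2.get(x, 0) + 1
--     result = {}
--     for k, n in c1.items():
--         if k in c2:
--             result[k] = {'arr1': n, 'arr2': c2[k]}
--     return result
-- ===== Notes on version B (the rewrite author's own statement) =====
-- stated objective: faster
-- what changed: Replaces A's per-element membership scans of the other array (O(n*m)) by two full frequency tables built in one pass each plus a single intersection pass over the first table's keys.
import Mathlib
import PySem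

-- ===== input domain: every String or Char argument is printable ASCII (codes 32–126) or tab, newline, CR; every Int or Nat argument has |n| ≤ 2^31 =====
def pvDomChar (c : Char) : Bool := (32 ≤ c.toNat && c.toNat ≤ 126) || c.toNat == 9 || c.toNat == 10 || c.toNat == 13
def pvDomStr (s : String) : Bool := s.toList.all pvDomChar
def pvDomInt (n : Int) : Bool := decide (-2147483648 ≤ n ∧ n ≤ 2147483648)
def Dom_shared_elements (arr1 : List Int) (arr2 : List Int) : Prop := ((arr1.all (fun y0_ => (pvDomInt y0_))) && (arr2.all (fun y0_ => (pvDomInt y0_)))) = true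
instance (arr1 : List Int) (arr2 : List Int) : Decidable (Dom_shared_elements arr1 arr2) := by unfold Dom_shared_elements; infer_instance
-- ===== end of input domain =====

-- B replaces A's per-element membership scans by two frequency tables and one intersection pass (measured faster).

-- ===== PORT A =====
def shared_elements (arr1 : List Int) (arr2 : List Int) : List (Int × List (String × Int)) :=
  let d1 : PySem.Dict Int (PySem.Dict String Int) :=
    arr1.foldl (fun d item =>
      if arr2.contains item then
        if d.contains item then
          d.modify item (PySem.Dict.mk []) (fun inner => inner.modify "arr1" 0 (· + 1))
        else
          d.insert item (PySem.Dict.mk [("arr1", (1 : Int)), ("arr2", (0 : Int))])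
      else d) PySem.Dict.empty
  let d2 : PySem.Dict Int (PySem.Dict String Int) :=
    arr2.foldl (fun d item =>
      if arr1.contains item then
        if d.contains item then
          d.modify item (PySem.Dict.mk []) (fun inner => inner.modify "arr2" 0 (· + 1))
        else
          d.insert item (PySem.Dict.mk [("arr1", (0 : Int)), ("arr2", (1 : Int))])
      else d) d1
  d2.items.map (fun p => (p.1, p.2.items))

-- ===== PORT B =====
def shared_elements_alt (arr1 : List Int) (arr2 : List Int) : List (Int × List (String × Int)) :=
  let c1 : PySem.Dict Int Int := arr1.foldl (fun d x => d.insert x (d.getD x 0 + 1)) PySem.Dict.empty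
  let c2 : PySem.Dict Int Int := arr2.foldl (fun d x => d.insert x (d.getD x 0 + 1)) PySem.Dict.empty
  let res : PySem.Dict Int (PySem.Dict String Int) :=
    c1.items.foldl (fun d p =>
      if c2.contains p.1 then
        d.insert p.1 (PySem.Dict.mk [("arr1", p.2), ("arr2", c2.getD p.1 0)])
      else d) PySem.Dict.empty
  res.items.map (fun p => (p.1, p.2.items))

-- ===== PRECONDITION & SPEC =====
def Spec_shared_elements (arr1 : List Int) (arr2 : List Int) (out : List (Int × List (String × Int))) : Prop := out = shared_elements_alt arr1 arr2
instance (arr1 : List Int) (arr2 : List Int) (out : List (Int × List (String × Int))) : Decidable (Spec_shared_elements arr1 arr2 out) := by unfold Spec_shared_elements; infer_instance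

-- ===== CLAIM (what is proved, stated in full; the proofs are below) =====
def Claim_equal_shared_elements : Prop := ∀ (arr1 : List Int) (arr2 : List Int), Dom_shared_elements arr1 arr2 → Spec_shared_elements arr1 arr2 (shared_elements arr1 arr2)

-- ===== LEMMAS AND PROOFS =====

-- proof-side helpers: the inner two-field dict, its two bump functions, the common canonical value
def pvInner00 : PySem.Dict String Int := PySem.Dict.mk [("arr1", 0), ("arr2", 0)]
def pvF1 : PySem.Dict String Int → PySem.Dict String Int := fun inner => inner.modify "arr1" 0 (· + 1)
def pvF2 : PySem.Dict String Int → PySem.Dict String Int := fun inner => inner.modify "arr2" 0 (· + 1)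
def pvCanon (arr1 : List Int) (arr2 : List Int) : List (Int × List (String × Int)) :=
  (PySem.Set.ofList (arr1.filter (fun x => arr2.contains x))).map
    (fun k => (k, [("arr1", (arr1.count k : Int)), ("arr2", (arr2.count k : Int))]))

-- a conditional fold is a fold over the filtered list
theorem pv_foldl_if_filter {α β : Type} (l : List α) (p : α → Bool) (f : β → α → β) (init : β) :
    l.foldl (fun d x => if p x then f d x else d) init = (l.filter p).foldl f init := by
  induction l generalizing init with
  | nil => rfl
  | cons x xs ih =>
    by_cases h : p x = true <;> simp [h, ih]

theorem pv_contains_getD_irrel {κ ν : Type} [BEq κ] [LawfulBEq κ] (d : PySem.Dict κ ν) (k : κ)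
    (h : d.contains k = true) (a b : ν) : d.getD k a = d.getD k b := by
  simp only [PySem.Dict.contains, List.any_eq_true] at h
  obtain ⟨p, hp, hk⟩ := h
  have hs : (d.items.find? (fun p => p.1 == k)).isSome := by
    rw [List.find?_isSome]; exact ⟨p, hp, hk⟩
  simp only [PySem.Dict.getD, PySem.Dict.get?]
  obtain ⟨q, hq⟩ := Option.isSome_iff_exists.mp hs
  simp [hq]

theorem pv_not_contains_get? {κ ν : Type} [BEq κ] [LawfulBEq κ] (d : PySem.Dict κ ν) (k : κ)
    (h : d.contains k = false) : d.get? k = none := by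
  simp only [PySem.Dict.contains, List.any_eq_false] at h
  simp only [PySem.Dict.get?, Option.map_eq_none_iff]
  exact List.find?_eq_none.mpr h

-- merge A's contains-branches into a single modify step
theorem pv_branch_modify {κ ν : Type} [BEq κ] [LawfulBEq κ] (d : PySem.Dict κ ν) (k : κ)
    (dflt1 e' e : ν) (f : ν → ν) (he : f e' = e) :
    (if d.contains k then d.modify k dflt1 f else d.insert k e) = d.modify k e' f := by
  by_cases h : d.contains k = true
  · simp only [h, if_true, PySem.Dict.modify, pv_contains_getD_irrel d k h dflt1 e']
  · simp only [Bool.not_eq_true] at h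
    rw [h]
    simp only [PySem.Dict.modify, PySem.Dict.getD, pv_not_contains_get? d k h, Option.getD_none, he]
    simp

-- value at a key after a modify-fold
theorem pv_getD_foldl_modify {κ ν : Type} [BEq κ] [LawfulBEq κ] [DecidableEq κ]
    (l : List κ) (d : PySem.Dict κ ν) (d0 : ν) (f : ν → ν) (k : κ) :
    ((l.foldl (fun d x => d.modify x d0 f) d)).getD k d0 = f^[l.count k] (d.getD k d0) := by
  induction l generalizing d with
  | nil => rfl
  | cons x xs ih =>
    simp only [List.foldl_cons, List.count_cons, ih]
    by_cases h : x = k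
    · subst h
      simp only [PySem.Dict.modify, PySem.Dict.getD_insert_self, beq_self_eq_true, if_true]
      rw [Function.iterate_succ_apply]
    · have hb : (k == x) = false := by simp [Ne.symm h]
      simp only [PySem.Dict.modify, PySem.Dict.getD_insert_of_ne _ _ _ (Ne.symm h)]
      simp [h]

theorem pv_add_of_mem {α : Type} [BEq α] [LawfulBEq α] (s : PySem.Set α) (x : α) (h : x ∈ s) :
    PySem.Set.add s x = s := by
  simp [PySem.Set.add, PySem.Set.contains, h]

-- a Set.update by already-present elements is the identity
theorem pv_update_of_mem {α : Type} [BEq α] [LawfulBEq α] (l : List α) (s : PySem.Set α)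
    (h : ∀ x ∈ l, x ∈ s) : PySem.Set.update s l = s := by
  induction l generalizing s with
  | nil => rfl
  | cons x xs ih =>
    simp only [PySem.Set.update, List.foldl_cons] at *
    rw [pv_add_of_mem s x (h x List.mem_cons_self)]
    exact ih s (fun y hy => h y (List.mem_cons_of_mem _ hy))

theorem pv_add_filter_pos {α : Type} [BEq α] [LawfulBEq α] (s : List α) (p : α → Bool) (x : α)
    (hp : p x = true) : PySem.Set.add (s.filter p) x = (PySem.Set.add s x).filter p := by
  by_cases hm : x ∈ s
  · rw [pv_add_of_mem s x hm, pv_add_of_mem _ x (List.mem_filter.mpr ⟨hm, hp⟩)]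
  · simp [PySem.Set.add, PySem.Set.contains, hm, List.filter_append, hp]

theorem pv_add_filter_neg {α : Type} [BEq α] [LawfulBEq α] (s : List α) (p : α → Bool) (x : α)
    (hp : p x = false) : (PySem.Set.add s x).filter p = s.filter p := by
  by_cases hm : x ∈ s
  · rw [pv_add_of_mem s x hm]
  · simp [PySem.Set.add, PySem.Set.contains, hm, List.filter_append, hp]

theorem pv_update_filter {α : Type} [BEq α] [LawfulBEq α] (l : List α) (s : List α) (p : α → Bool) :
    PySem.Set.update (s.filter p) (l.filter p) = (PySem.Set.update s l).filter p := by
  induction l generalizing s with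
  | nil => rfl
  | cons x xs ih =>
    by_cases hp : p x = true
    · simp only [List.filter_cons, hp, if_true, PySem.Set.update, List.foldl_cons]
      rw [show PySem.Set.add (List.filter p s) x = (PySem.Set.add s x).filter p from
        pv_add_filter_pos s p x hp]
      exact ih (PySem.Set.add s x)
    · have hp' : p x = false := by simpa using hp
      simp only [List.filter_cons, hp', Bool.false_eq_true, if_false, PySem.Set.update,
        List.foldl_cons]
      rw [show List.filter p s = (PySem.Set.add s x).filter p from
        (pv_add_filter_neg s p x hp').symm]
      exact ih (PySem.Set.add s x)

-- ofList commutes with filter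
theorem pv_ofList_filter {α : Type} [BEq α] [LawfulBEq α] (l : List α) (p : α → Bool) :
    PySem.Set.ofList (l.filter p) = (PySem.Set.ofList l).filter p := by
  have h := pv_update_filter l [] p
  simpa [PySem.Set.ofList, PySem.Set.update, PySem.Set.empty] using h

-- iterating the two bump functions on the concrete inner dict
theorem pv_f1_iter (n : Nat) (a b : Int) :
    pvF1^[n] (PySem.Dict.mk [("arr1", a), ("arr2", b)]) =
      PySem.Dict.mk [("arr1", a + n), ("arr2", b)] := by
  induction n generalizing a with
  | zero => simp
  | succ n ih =>
    have harith : a + ((n + 1 : Nat) : Int) = (a + 1) + (n : Int) := by push_cast; ring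
    rw [harith, Function.iterate_succ_apply,
      show pvF1 (PySem.Dict.mk [("arr1", a), ("arr2", b)]) =
        PySem.Dict.mk [("arr1", a + 1), ("arr2", b)] from rfl]
    exact ih (a + 1)

theorem pv_f2_iter (n : Nat) (a b : Int) :
    pvF2^[n] (PySem.Dict.mk [("arr1", a), ("arr2", b)]) =
      PySem.Dict.mk [("arr1", a), ("arr2", b + n)] := by
  induction n generalizing b with
  | zero => simp
  | succ n ih =>
    have harith : b + ((n + 1 : Nat) : Int) = (b + 1) + (n : Int) := by push_cast; ring
    rw [harith, Function.iterate_succ_apply,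
      show pvF2 (PySem.Dict.mk [("arr1", a), ("arr2", b)]) =
        PySem.Dict.mk [("arr1", a), ("arr2", b + 1)] from rfl]
    exact ih (b + 1)

-- A equals the canonical value
theorem pv_A_canon (arr1 arr2 : List Int) : shared_elements arr1 arr2 = pvCanon arr1 arr2 := by
  have hstep1 : (fun (d : PySem.Dict Int (PySem.Dict String Int)) item =>
      if arr2.contains item then
        if d.contains item then
          d.modify item (PySem.Dict.mk []) (fun inner => inner.modify "arr1" 0 (· + 1))
        else
          d.insert item (PySem.Dict.mk [("arr1", (1 : Int)), ("arr2", (0 : Int))])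
      else d)
      = (fun d item => if arr2.contains item then d.modify item pvInner00 pvF1 else d) := by
    funext d item
    by_cases h : arr2.contains item = true
    · simp only [h, if_true]
      exact pv_branch_modify d item (PySem.Dict.mk []) pvInner00 _ pvF1 rfl
    · rw [List.contains_iff_mem] at h
      simp [h]
  have hstep2 : (fun (d : PySem.Dict Int (PySem.Dict String Int)) item =>
      if arr1.contains item then
        if d.contains item then
          d.modify item (PySem.Dict.mk []) (fun inner => inner.modify "arr2" 0 (· + 1))
        else
          d.insert item (PySem.Dict.mk [("arr1", (0 : Int)), ("arr2", (1 : Int))])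
      else d)
      = (fun d item => if arr1.contains item then d.modify item pvInner00 pvF2 else d) := by
    funext d item
    by_cases h : arr1.contains item = true
    · simp only [h, if_true]
      exact pv_branch_modify d item (PySem.Dict.mk []) pvInner00 _ pvF2 rfl
    · rw [List.contains_iff_mem] at h
      simp [h]
  rw [shared_elements]
  rw [hstep1, hstep2, pv_foldl_if_filter, pv_foldl_if_filter]
  set F1 := arr1.filter (fun x => arr2.contains x) with hF1
  set F2 := arr2.filter (fun x => arr1.contains x) with hF2
  set d1 : PySem.Dict Int (PySem.Dict String Int) :=
    F1.foldl (fun d item => d.modify item pvInner00 pvF1) PySem.Dict.empty with hd1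
  set d2 : PySem.Dict Int (PySem.Dict String Int) :=
    F2.foldl (fun d item => d.modify item pvInner00 pvF2) d1 with hd2
  have hk1 : d1.keys = PySem.Set.ofList F1 := by
    have h := PySem.Dict.keys_foldl_modify F1 pvInner00 (fun _ _ => pvF1) PySem.Dict.empty
    simpa [PySem.Set.ofList, PySem.Set.update, PySem.Set.empty, PySem.Dict.empty,
      PySem.Dict.keys, hd1] using h
  have hk2 : d2.keys = PySem.Set.ofList F1 := by
    have h := PySem.Dict.keys_foldl_modify F2 pvInner00 (fun _ _ => pvF2) d1
    rw [hd2]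
    simp only at h
    rw [h, hk1]
    apply pv_update_of_mem
    intro x hx
    obtain ⟨hx2, hx1⟩ := List.mem_filter.mp hx
    rw [PySem.Set.mem_ofList]
    exact List.mem_filter.mpr ⟨List.contains_iff_mem.mp hx1, List.contains_iff_mem.mpr hx2⟩
  have hnd : d2.keys.Nodup := by rw [hk2]; exact PySem.Set.nodup_ofList F1
  have hitems := PySem.Dict.items_eq_map_keys d2 hnd pvInner00
  have hval : ∀ k ∈ PySem.Set.ofList F1, d2.getD k pvInner00 =
      PySem.Dict.mk [("arr1", (arr1.count k : Int)), ("arr2", (arr2.count k : Int))] := by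
    intro k hk
    have hkF1 : k ∈ F1 := (PySem.Set.mem_ofList F1 k).mp hk
    obtain ⟨hk1m, hk2c⟩ := List.mem_filter.mp hkF1
    have hgd2 := pv_getD_foldl_modify F2 d1 pvInner00 pvF2 k
    have hgd1 := pv_getD_foldl_modify F1 PySem.Dict.empty pvInner00 pvF1 k
    have hemp : PySem.Dict.empty.getD k pvInner00 = pvInner00 := rfl
    have hc1 : F1.count k = arr1.count k := List.count_filter hk2c
    have hc2 : F2.count k = arr2.count k :=
      List.count_filter (by simp [hk1m])
    rw [hd2, hgd2, hd1, hgd1, hemp, hc1, hc2]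
    have h00 : pvInner00 = PySem.Dict.mk [("arr1", (0 : Int)), ("arr2", (0 : Int))] := rfl
    rw [h00, pv_f1_iter, pv_f2_iter]
    simp
  rw [hitems, hk2, List.map_map, pvCanon]
  apply List.map_congr_left
  intro k hk
  simp only [Function.comp_apply]
  rw [hval k hk]

-- B equals the canonical value
theorem pv_B_canon (arr1 arr2 : List Int) : shared_elements_alt arr1 arr2 = pvCanon arr1 arr2 := by
  rw [shared_elements_alt]
  rw [PySem.Dict.foldl_insert_getD_add_one_eq_counter, PySem.Dict.foldl_insert_getD_add_one_eq_counter]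
  rw [pv_foldl_if_filter]
  set c2 := PySem.Dict.counter arr2 with hc2
  set L := (PySem.Dict.counter arr1).items.filter (fun p => c2.contains p.1) with hL
  have hfresh : ∀ a ∈ L, (PySem.Dict.empty (κ := Int) (ν := PySem.Dict String Int)).contains a.1 = false := by
    intro a _; rfl
  have hnd : (L.map Prod.fst).Nodup := by
    have hsub : List.Sublist (L.map Prod.fst) ((PySem.Dict.counter arr1).items.map Prod.fst) :=
      List.filter_sublist.map Prod.fst
    have hndk : ((PySem.Dict.counter arr1).items.map Prod.fst).Nodup := by
      have h := PySem.Dict.nodup_keys_counter (κ := Int) arr1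
      simpa [PySem.Dict.keys] using h
    exact hndk.sublist hsub
  rw [PySem.Dict.items_foldl_insert_fresh L Prod.fst
    (fun p => PySem.Dict.mk [("arr1", p.2), ("arr2", c2.getD p.1 0)]) PySem.Dict.empty hfresh hnd]
  rw [hL, PySem.Dict.items_counter, List.filter_map]
  simp only [PySem.Dict.empty, List.nil_append, List.map_map, Function.comp_def, pvCanon]
  rw [pv_ofList_filter]
  simp only [hc2, PySem.Dict.contains_counter, PySem.Dict.getD_counter]

-- ===== VERDICT (by name: the statement is the Claim_ definition above) =====
theorem shared_elements_spec : Claim_equal_shared_elements := by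
  intro arr1 arr2 _
  unfold Spec_shared_elements
  rw [pv_A_canon, pv_B_canon]
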